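-- pv_equiv track=rewrite | github.com/qianntong/CSP-Project | archive/shortestpath.py | tree_index
-- ===== SOURCE A (Python) =====
-- def tree_index(n):   # tree index for each node
--     tree_indices = {}
--     index = 1
--     for i in range(1, n + 1):
--         nodes_in_level = 2 ** (i - 1)
--         tree_indices[i] = list(range(index, index + nodes_in_level))
--         index += nodes_in_level
--     return tree_indices
-- ===== SOURCE B (Python) =====
-- def tree_index(n):   # tree index for each node
--     if n <= 0:
--         return {}
--     flat = list(range(1, 2 ** n))
--     return {i: flat[2 ** (i - 1) - 1: 2 ** i - 1] for i in range(1, n + 1)}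
-- ===== Notes on version B (the rewrite author's own statement) =====
-- stated objective: alternative
-- what changed: B materializes the whole flat node-index sequence once as a single list and then partitions it into per-level chunks by slicing, instead of A's per-level range generation driven by a running index accumulator.
import Mathlib
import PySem

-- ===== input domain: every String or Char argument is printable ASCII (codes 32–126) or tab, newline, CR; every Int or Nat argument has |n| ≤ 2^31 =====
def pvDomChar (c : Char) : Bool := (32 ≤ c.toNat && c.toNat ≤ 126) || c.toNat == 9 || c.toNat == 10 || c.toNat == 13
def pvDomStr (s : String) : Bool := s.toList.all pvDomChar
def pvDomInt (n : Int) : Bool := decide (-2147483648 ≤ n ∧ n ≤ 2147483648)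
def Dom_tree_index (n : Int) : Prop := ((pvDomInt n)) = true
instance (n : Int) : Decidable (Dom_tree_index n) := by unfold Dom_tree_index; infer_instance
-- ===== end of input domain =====

-- B builds the whole flat index list once and slices it into level chunks, instead of A's
-- running-index per-level range generation (objective: alternative decomposition, same cost).

-- ===== PORT A =====
def tree_index (n : Int) : List (Int × List Int) :=
  (((PySem.List.pyRange 1 (n + 1) 1).foldl
      (fun (st : PySem.Dict Int (List Int) × Int) i =>
        let nodes : Int := 2 ^ (i - 1).toNat
        (st.1.insert i (PySem.List.pyRange st.2 (st.2 + nodes) 1), st.2 + nodes))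
      (PySem.Dict.empty, 1)).1).items

-- ===== PORT B =====
def tree_index_alt (n : Int) : List (Int × List Int) :=
  if n ≤ 0 then []
  else
    let flat := PySem.List.pyRange 1 (2 ^ n.toNat) 1
    ((PySem.List.pyRange 1 (n + 1) 1).foldl
        (fun (d : PySem.Dict Int (List Int)) i =>
          d.insert i (PySem.List.slice flat (some (2 ^ (i - 1).toNat - 1)) (some (2 ^ i.toNat - 1))))
        PySem.Dict.empty).items

-- ===== PRECONDITION & SPEC =====
def Spec_tree_index (n : Int) (out : List (Int × List Int)) : Prop := out = tree_index_alt n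
instance (n : Int) (out : List (Int × List Int)) : Decidable (Spec_tree_index n out) := by unfold Spec_tree_index; infer_instance

-- ===== CLAIM (what is proved, stated in full; the proofs are below) =====
def Claim_equal_tree_index : Prop := ∀ (n : Int), Dom_tree_index n → Spec_tree_index n (tree_index n)

-- ===== LEMMAS AND PROOFS =====

/-- the common closed form: level j+1 holds indices 2^j .. 2^(j+1)-1 -/
def pvLevels (m : Nat) : List (Int × List Int) :=
  (List.range m).map (fun (j : Nat) => ((j : Int) + 1, PySem.List.pyRange ((2 ^ j : Nat) : Int) ((2 ^ (j + 1) : Nat) : Int) 1))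

theorem pvLevels_succ (m : Nat) :
    pvLevels (m + 1) = pvLevels m ++ [((m : Int) + 1, PySem.List.pyRange ((2 ^ m : Nat) : Int) ((2 ^ (m + 1) : Nat) : Int) 1)] := by
  simp [pvLevels, List.range_succ]

theorem pvAuxA (m : Nat) :
    (PySem.List.pyRange 1 ((m : Int) + 1) 1).foldl
      (fun (st : PySem.Dict Int (List Int) × Int) i =>
        let nodes : Int := 2 ^ (i - 1).toNat
        (st.1.insert i (PySem.List.pyRange st.2 (st.2 + nodes) 1), st.2 + nodes))
      (PySem.Dict.empty, 1)
    = (PySem.Dict.mk (pvLevels m), 2 ^ m) := by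
  induction m with
  | zero =>
    rw [PySem.List.pyRange_one_eq_nil (by omega)]
    simp [pvLevels, PySem.Dict.empty]
  | succ m ih =>
    have hsplit : PySem.List.pyRange 1 (((m + 1 : Nat) : Int) + 1) 1
        = PySem.List.pyRange 1 ((m : Int) + 1) 1 ++ [(m : Int) + 1] := by
      push_cast
      exact PySem.List.pyRange_one_succ_right (by omega)
    rw [hsplit, List.foldl_append, ih]
    have htn : (((m : Int) + 1) - 1).toNat = m := by omega
    have hnc : (PySem.Dict.mk (pvLevels m)).contains ((m : Int) + 1) = false := by
      rw [PySem.Dict.contains_eq_decide_mem_keys]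
      simp only [PySem.Dict.keys, pvLevels, List.map_map, decide_eq_false_iff_not]
      intro hmem
      simp only [List.mem_map, List.mem_range, Function.comp] at hmem
      obtain ⟨j, hj, hje⟩ := hmem
      omega
    simp only [List.foldl_cons, List.foldl_nil, htn]
    refine Prod.ext ?_ ?_
    · apply PySem.Dict.ext
      show ((PySem.Dict.mk (pvLevels m)).insert ((m:Int)+1) _).items = pvLevels (m + 1)
      rw [PySem.Dict.items_insert_of_not_contains _ _ hnc]
      rw [pvLevels_succ]
      congr 3
      all_goals (push_cast; ring_nf)
    · show (2 : Int) ^ m + 2 ^ m = 2 ^ (m + 1)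
      ring

theorem pvSliceLevel (j N : Nat) (h : j < N) :
    PySem.List.slice (PySem.List.pyRange 1 ((2 : Int) ^ N) 1)
      (some ((2 : Int) ^ j - 1)) (some ((2 : Int) ^ (j + 1) - 1))
    = PySem.List.pyRange ((2 ^ j : Nat) : Int) ((2 ^ (j + 1) : Nat) : Int) 1 := by
  have h2 : ((2 : Int) ^ j) = ((2 ^ j : Nat) : Int) := by push_cast; ring
  have h3 : ((2 : Int) ^ (j + 1)) = ((2 ^ (j + 1) : Nat) : Int) := by push_cast; ring
  have h4 : ((2 : Int) ^ N) = ((2 ^ N : Nat) : Int) := by push_cast; ring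
  have h1 : (1 : Int) ≤ 2 ^ j := by rw [h2]; exact_mod_cast Nat.one_le_two_pow
  have h1' : (1 : Int) ≤ 2 ^ (j + 1) := by rw [h3]; exact_mod_cast Nat.one_le_two_pow
  have hjj : (2 : Nat) ^ j ≤ 2 ^ (j + 1) := Nat.pow_le_pow_right (by omega) (by omega)
  have hjN : (2 : Nat) ^ (j + 1) ≤ 2 ^ N := Nat.pow_le_pow_right (by omega) (by omega)
  have h1n : (1 : Nat) ≤ 2 ^ j := Nat.one_le_two_pow
  rw [PySem.List.slice_toNat _ (by linarith) (by linarith)]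
  have ht1 : ((2 : Int) ^ j - 1).toNat = 2 ^ j - 1 := by rw [h2]; omega
  have ht2 : ((2 : Int) ^ (j + 1) - 1).toNat = 2 ^ (j + 1) - 1 := by rw [h3]; omega
  rw [ht1, ht2]
  have hsplit1 : PySem.List.pyRange 1 ((2 : Int) ^ N) 1
      = PySem.List.pyRange 1 ((2 ^ j : Nat) : Int) 1 ++ PySem.List.pyRange ((2 ^ j : Nat) : Int) ((2 : Int) ^ N) 1 :=
    PySem.List.pyRange_one_append 1 _ _ (by omega) (by rw [h4]; exact_mod_cast le_trans hjj hjN)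
  have hsplit2 : PySem.List.pyRange ((2 ^ j : Nat) : Int) ((2 : Int) ^ N) 1
      = PySem.List.pyRange ((2 ^ j : Nat) : Int) ((2 ^ (j + 1) : Nat) : Int) 1
        ++ PySem.List.pyRange ((2 ^ (j + 1) : Nat) : Int) ((2 : Int) ^ N) 1 :=
    PySem.List.pyRange_one_append _ _ _ (by exact_mod_cast hjj) (by rw [h4]; exact_mod_cast hjN)
  rw [hsplit1, List.drop_left' (by rw [PySem.List.length_pyRange_one]; omega)]
  rw [hsplit2, List.take_left' (by rw [PySem.List.length_pyRange_one]; omega)]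

theorem pvAltEq (n : Int) (h : 0 < n) : tree_index_alt n = pvLevels n.toNat := by
  rw [tree_index_alt, if_neg (by omega)]
  rw [PySem.Dict.items_foldl_insert_fresh _ (fun i => i) _ _
        (by intro a _; simp [PySem.Dict.empty, PySem.Dict.contains])
        (by simpa using PySem.List.nodup_pyRange_one 1 (n + 1))]
  simp only [PySem.Dict.empty, List.nil_append]
  rw [PySem.List.pyRange_one 1 (n + 1)]
  have htn : (n + 1 - 1).toNat = n.toNat := by omega
  rw [htn, pvLevels, List.map_map]
  refine List.map_congr_left ?_
  intro j hj
  have hjlt : j < n.toNat := List.mem_range.mp hj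
  have e1 : ((1 + (j : Int)) - 1).toNat = j := by omega
  have e2 : (1 + (j : Int)).toNat = j + 1 := by omega
  simp only [Function.comp_apply, e1, e2]
  rw [pvSliceLevel j n.toNat hjlt]
  congr 1
  ring

-- ===== VERDICT (by name: the statement is the Claim_ definition above) =====
theorem tree_index_spec : Claim_equal_tree_index := by
  intro n _
  unfold Spec_tree_index
  by_cases h : n ≤ 0
  · have hA : PySem.List.pyRange 1 (n + 1) 1 = [] :=
      PySem.List.pyRange_one_eq_nil (by omega)
    simp [tree_index, tree_index_alt, hA, h, PySem.Dict.empty]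
  · have h' : 0 < n := by omega
    have hn : n = (n.toNat : Int) := by omega
    rw [pvAltEq n h', tree_index, hn, pvAuxA n.toNat]
    congr 1
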